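-- pv_equiv track=rewrite | github.com/evipulp/t2020-1-1 | Problem3.py | ConditionalOdd
-- ===== SOURCE A (Python) =====
-- def ConditionalOdd(x):
--     result = []
--     for i in range(1, x*2):
--         if i%2 != 0:
--             result.append(i)
--     res = ''
--     if x%2 == 0:
--         res = result[:x-1]
--     if res:
--         return res
--     else:
--         return result
-- ===== SOURCE B (Python) =====
-- def ConditionalOdd(x):
--     n = x if x % 2 != 0 else x - 1
--     return list(range(1, 2 * n, 2))
-- ===== Notes on version B (the rewrite author's own statement) =====
-- stated objective: simpler
-- what changed: Instead of building the full filtered list of odds over range(1,2x) and then conditionally slicing it, B decides the output length up front by parity (n = x or x-1) and generates exactly those odds in one stepped range.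
import Mathlib
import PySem

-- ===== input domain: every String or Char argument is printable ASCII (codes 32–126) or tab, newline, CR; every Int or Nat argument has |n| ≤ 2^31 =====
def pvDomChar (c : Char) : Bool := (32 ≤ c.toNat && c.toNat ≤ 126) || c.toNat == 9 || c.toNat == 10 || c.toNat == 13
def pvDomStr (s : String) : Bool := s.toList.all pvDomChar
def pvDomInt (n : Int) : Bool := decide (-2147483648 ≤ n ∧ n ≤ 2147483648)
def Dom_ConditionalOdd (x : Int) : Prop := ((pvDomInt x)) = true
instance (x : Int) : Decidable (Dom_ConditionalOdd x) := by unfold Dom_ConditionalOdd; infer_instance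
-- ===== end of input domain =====

-- B decides the output length up front by parity (n = x or x-1) and generates the odds
-- in one stepped range, instead of A's build-full-filtered-list-then-conditionally-slice. Objective: simpler.


-- ===== PORT A =====
def ConditionalOdd (x : Int) : List Int :=
  -- result = []; for i in range(1, x*2): if i % 2 != 0: result.append(i)
  let result := (PySem.List.pyRange 1 (x * 2) 1).foldl
    (fun acc i => if PySem.Int.mod i 2 ≠ 0 then acc ++ [i] else acc) []
  -- res = '' (falsy); if x % 2 == 0: res = result[:x-1]
  let res := if PySem.Int.mod x 2 = 0 then PySem.List.slice result none (some (x - 1)) else []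
  -- if res: return res else: return result   (falsy '' and [] both take the else branch)
  if res ≠ [] then res else result

-- ===== PORT B =====
def ConditionalOdd_alt (x : Int) : List Int :=
  let n := if PySem.Int.mod x 2 ≠ 0 then x else x - 1
  PySem.List.pyRange 1 (2 * n) 2

-- ===== PRECONDITION & SPEC =====
def Spec_ConditionalOdd (x : Int) (out : List Int) : Prop := out = ConditionalOdd_alt x
instance (x : Int) (out : List Int) : Decidable (Spec_ConditionalOdd x out) := by unfold Spec_ConditionalOdd; infer_instance

-- ===== CLAIM (what is proved, stated in full; the proofs are below) =====
def Claim_equal_ConditionalOdd : Prop := ∀ (x : Int), Dom_ConditionalOdd x → Spec_ConditionalOdd x (ConditionalOdd x)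

-- ===== LEMMAS AND PROOFS =====

-- the common closed form: the first m odd numbers
def pvOdds (m : Nat) : List Int := (List.range m).map (fun k : Nat => (1 : Int) + 2 * (k : Int))

lemma length_pvOdds (m : Nat) : (pvOdds m).length = m := by simp [pvOdds]

lemma pvOdds_ne_nil {m : Nat} (h : 0 < m) : pvOdds m ≠ [] := by
  intro hnil
  have := length_pvOdds m
  rw [hnil] at this
  simp at this
  omega

-- B's stepped range is the first n.toNat odds
lemma alt_range_eq (n : Int) : PySem.List.pyRange 1 (2 * n) 2 = pvOdds n.toNat := by
  rw [PySem.List.pyRange_of_pos 1 (2 * n) (by norm_num)]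
  have : (if (1 : Int) < 2 * n then ((2 * n - 1 + 2 - 1) / 2).toNat else 0) = n.toNat := by
    split_ifs with h
    · have : (2 * n - 1 + 2 - 1) = 2 * n := by ring
      rw [this, Int.mul_ediv_cancel_left _ (by norm_num)]
    · omega
  rw [this, pvOdds]

-- A's filtered range(1, 2m) is the first m odds
lemma filt_eq (m : Nat) :
    (PySem.List.pyRange 1 (2 * (m : Int)) 1).filter
      (fun i => decide (PySem.Int.mod i 2 ≠ 0)) = pvOdds m := by
  induction m with
  | zero => decide
  | succ m ih =>
    rcases Nat.eq_zero_or_pos m with hm | hm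
    · subst hm; decide
    · have h1 : (2 : Int) * ((m + 1 : Nat) : Int) = (2 * (m : Int) + 1) + 1 := by push_cast; ring
      have h2 : PySem.List.pyRange 1 (2 * ((m + 1 : Nat) : Int)) 1
          = PySem.List.pyRange 1 (2 * (m : Int)) 1 ++ [2 * (m : Int)] ++ [2 * (m : Int) + 1] := by
        rw [h1, PySem.List.pyRange_one_succ_right (by omega),
            PySem.List.pyRange_one_succ_right (by omega)]
      rw [h2]
      simp only [List.filter_append, ih, List.filter_cons, List.filter_nil]
      have hm0 : PySem.Int.mod (2 * (m : Int)) 2 = 0 := by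
        rw [PySem.Int.mod_eq_emod_of_pos (by norm_num)]; omega
      have hm1 : PySem.Int.mod (2 * (m : Int) + 1) 2 = 1 := by
        rw [PySem.Int.mod_eq_emod_of_pos (by norm_num)]; omega
      simp [pvOdds, List.range_succ]
      omega

-- A's loop result in closed form, for any x
lemma resultA_eq (x : Int) :
    (PySem.List.pyRange 1 (x * 2) 1).foldl
      (fun acc i => if PySem.Int.mod i 2 ≠ 0 then acc ++ [i] else acc) [] = pvOdds x.toNat := by
  rw [PySem.List.foldl_append_ite_eq_filter (fun i => PySem.Int.mod i 2 ≠ 0)]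
  by_cases hx : x ≤ 0
  · rw [PySem.List.pyRange_one_eq_nil (by omega)]
    have : x.toNat = 0 := by omega
    simp [this, pvOdds]
  · have hx2 : x * 2 = 2 * ((x.toNat : Int)) := by omega
    rw [List.nil_append, hx2]
    exact_mod_cast filt_eq x.toNat

-- taking the first j odds out of m
lemma take_pvOdds (j m : Nat) : (pvOdds m).take j = pvOdds (min j m) := by
  simp [pvOdds, ← List.map_take, List.take_range]

-- ===== VERDICT (by name: the statement is the Claim_ definition above) =====
theorem ConditionalOdd_spec : Claim_equal_ConditionalOdd := by
  intro x _
  show ConditionalOdd x = ConditionalOdd_alt x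
  unfold ConditionalOdd ConditionalOdd_alt
  simp only [resultA_eq, alt_range_eq]
  by_cases hpar : PySem.Int.mod x 2 = 0
  · -- x even
    have hne : ¬ PySem.Int.mod x 2 ≠ 0 := by simpa using hpar
    simp only [if_pos hpar, if_neg hne]
    have hdvd : (2 : Int) ∣ x := (PySem.Int.mod_eq_zero_iff_dvd x 2).mp hpar
    by_cases hx : x ≤ 0
    · have h0 : x.toNat = 0 := by omega
      have h1 : (x - 1).toNat = 0 := by omega
      simp [h0, h1, pvOdds, PySem.List.slice]
    · -- x even positive, so x ≥ 2
      have hx2 : 2 ≤ x := by omega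
      rw [PySem.List.slice_to _ (by omega : (0:Int) ≤ x - 1), take_pvOdds]
      have : min (x - 1).toNat x.toNat = (x - 1).toNat := by omega
      rw [this]
      rw [if_pos (pvOdds_ne_nil (by omega))]
  · have hx1 : PySem.Int.mod x 2 ≠ 0 := hpar
    simp only [if_neg hpar, if_pos hx1]
    simp
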